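-- pv_equiv track=rewrite | github.com/NESHGP04/Lab8-IA | task2_2.py | count_violations
-- ===== SOURCE A (Python) =====
-- MAX_CAP    = 3          # Capacidad máxima por servidor
--
-- ANTI_AFFINITY_PAIRS = {('M1', 'M2'), ('M3', 'M4'), ('M5', 'M6'), ('M1', 'M5')}
--
-- def count_violations(assignment: dict) -> int:
--     """
--     Calcula el número total de violaciones de restricciones en una
--     asignación parcial o completa.
--
--     Se cuentan dos tipos de violaciones:
--       (a) Capacidad: cada microservicio extra por encima de MAX_CAP en un servidor.
--       (b) Anti-Afinidad: par de microservicios asignados al mismo servidor.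
--
--     Un candidato con MENOR puntaje es preferido (mejor candidato).
--     """
--     violations = 0
--
--     # (a) Violaciones de Capacidad
--     counts = {}
--     for s in assignment.values():
--         counts[s] = counts.get(s, 0) + 1
--     for s, cnt in counts.items():
--         if cnt > MAX_CAP:
--             violations += (cnt - MAX_CAP)  # Cada micro extra sobre el límite suma 1
--
--     # (b) Violaciones de Anti-Afinidad
--     assigned_vars = list(assignment.keys())
--     for i in range(len(assigned_vars)):
--         for j in range(i + 1, len(assigned_vars)):
--             v1, v2 = assigned_vars[i], assigned_vars[j]
--             pair = (v1, v2) if (v1, v2) in ANTI_AFFINITY_PAIRS else (v2, v1)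
--             if pair in ANTI_AFFINITY_PAIRS:
--                 if assignment[v1] == assignment[v2]:
--                     violations += 1
--
--     return violations
-- ===== SOURCE B (Python) =====
-- MAX_CAP    = 3          # Capacidad máxima por servidor
--
-- ANTI_AFFINITY_PAIRS = {('M1', 'M2'), ('M3', 'M4'), ('M5', 'M6'), ('M1', 'M5')}
--
-- def count_violations(assignment: dict) -> int:
--     # Index each server's members once, then read both violation kinds off it:
--     # capacity from the group sizes, anti-affinity from the four fixed pairs.
--     servers = {}
--     for m, s in assignment.items():
--         servers.setdefault(s, []).append(m)
--     cap = sum(max(0, len(ms) - MAX_CAP) for ms in servers.values())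
--     anti = sum(1 for a, b in ANTI_AFFINITY_PAIRS
--                if a in assignment and b in assignment
--                and assignment[a] == assignment[b])
--     return cap + anti
-- ===== Notes on version B (the rewrite author's own statement) =====
-- stated objective: faster
-- what changed: Replaces A's O(n^2) all-pairs index scan over the assigned variables with a single pass that groups microservices by server (capacity = sum of max(0, group size - MAX_CAP)) plus a direct lookup for each of the four fixed anti-affinity pairs.
import Mathlib
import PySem

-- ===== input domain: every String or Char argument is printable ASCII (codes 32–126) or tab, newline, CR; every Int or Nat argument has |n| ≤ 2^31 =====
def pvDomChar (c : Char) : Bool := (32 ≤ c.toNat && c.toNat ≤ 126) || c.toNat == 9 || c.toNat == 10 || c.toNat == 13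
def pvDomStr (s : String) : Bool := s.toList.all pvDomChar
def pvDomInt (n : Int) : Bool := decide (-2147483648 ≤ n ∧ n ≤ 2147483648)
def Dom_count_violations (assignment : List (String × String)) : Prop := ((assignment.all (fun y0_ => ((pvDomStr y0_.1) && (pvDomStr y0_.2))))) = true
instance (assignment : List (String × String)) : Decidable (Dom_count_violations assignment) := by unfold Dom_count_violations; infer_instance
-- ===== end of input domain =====

-- B re-implements A by one grouping pass (server -> members) read off for capacity plus
-- direct lookups for the four fixed anti-affinity pairs, instead of A's all-pairs scan.

-- ===== PORT A =====
def MAX_CAP : Int := 3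

def ANTI_AFFINITY_PAIRS : PySem.Set (String × String) :=
  PySem.Set.ofList [("M1", "M2"), ("M3", "M4"), ("M5", "M6"), ("M1", "M5")]

def count_violations (assignment : List (String × String)) : Int :=
  -- the Python parameter is a dict; its association-list decoding
  let d := PySem.Dict.ofList assignment
  -- (a) capacity violations: counts[s] = counts.get(s, 0) + 1
  let counts := d.values.foldl (fun c s => c.insert s (c.getD s 0 + 1)) PySem.Dict.empty
  let violations := counts.items.foldl
    (fun v p => if p.2 > MAX_CAP then v + (p.2 - MAX_CAP) else v) (0 : Int)
  -- (b) anti-affinity violations: nested index loop over the assigned vars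
  let assigned_vars := d.keys
  let n := PySem.List.len assigned_vars
  (PySem.List.pyRange 0 n 1).foldl (fun acc i =>
    (PySem.List.pyRange (i + 1) n 1).foldl (fun acc j =>
      let v1 := PySem.List.pyGetD assigned_vars i ""
      let v2 := PySem.List.pyGetD assigned_vars j ""
      let pair := if ANTI_AFFINITY_PAIRS.contains (v1, v2) then (v1, v2) else (v2, v1)
      if ANTI_AFFINITY_PAIRS.contains pair then
        if d.get? v1 == d.get? v2 then acc + 1 else acc
      else acc) acc) violations

-- ===== PORT B =====
def count_violations_alt (assignment : List (String × String)) : Int :=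
  let d := PySem.Dict.ofList assignment
  -- servers.setdefault(s, []).append(m)  ported as modify (exact: append mutates the stored list)
  let servers := d.items.foldl
    (fun g p => g.modify p.2 [] (fun ms => ms ++ [p.1])) PySem.Dict.empty
  let cap := (servers.values.map (fun ms => max 0 ((ms.length : Int) - MAX_CAP))).sum
  -- sum over the set of pairs: order-independent, so iterating the Set's list is exact
  let anti := (ANTI_AFFINITY_PAIRS.map (fun p =>
    if d.contains p.1 && d.contains p.2 && (d.get? p.1 == d.get? p.2) then (1 : Int) else 0)).sum
  cap + anti

-- ===== PRECONDITION & SPEC =====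
def Spec_count_violations (assignment : List (String × String)) (out : Int) : Prop := out = count_violations_alt assignment
instance (assignment : List (String × String)) (out : Int) : Decidable (Spec_count_violations assignment out) := by unfold Spec_count_violations; infer_instance

-- ===== CLAIM (what is proved, stated in full; the proofs are below) =====
def Claim_equal_count_violations : Prop := ∀ (assignment : List (String × String)), Dom_count_violations assignment → Spec_count_violations assignment (count_violations assignment)

-- ===== LEMMAS AND PROOFS =====

-- structural form of A's double index loop: for each x, the pair terms with every later y
def pairSum (c : String → String → Int) : List String → Int
  | [] => 0
  | x :: xs => (xs.map (c x)).sum + pairSum c xs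

theorem sum_drop_eq_pairSum (c : String → String → Int) (vars : List String) :
    ((List.range vars.length).map
      (fun k => ((vars.drop (k+1)).map (c (vars.getD k ""))).sum)).sum = pairSum c vars := by
  induction vars with
  | nil => simp [pairSum]
  | cons x xs ih =>
    rw [List.length_cons, List.range_succ_eq_map]
    simp only [List.map_cons, List.map_map, List.sum_cons, Function.comp_def,
      List.drop_succ_cons, List.getD_cons_succ, List.getD_cons_zero, List.drop_zero]
    rw [pairSum]
    simp only [Nat.succ_eq_add_one]; rw [ih]
theorem double_loop (vars : List String) (c : String → String → Int) (acc : Int) :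
    (PySem.List.pyRange 0 (PySem.List.len vars) 1).foldl (fun a i =>
      (PySem.List.pyRange (i + 1) (PySem.List.len vars) 1).foldl (fun a j =>
        a + c (PySem.List.pyGetD vars i "") (PySem.List.pyGetD vars j "")) a) acc
    = acc + pairSum c vars := by
  rw [PySem.List.foldl_congr_mem (g := fun a i =>
        a + ((vars.drop (i+1).toNat).map (c (PySem.List.pyGetD vars i ""))).sum)]
  · rw [PySem.List.foldl_add, ← sum_drop_eq_pairSum c vars]
    congr 1
    rw [PySem.List.pyRange_one]
    simp [List.map_map, Function.comp_def]
  · intro a i hi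
    rw [PySem.List.foldl_pyRange_pyGetD (a := i+1) (d := "")
        (f := fun a y => a + c (PySem.List.pyGetD vars i "") y)]
    · rw [PySem.List.foldl_add]
    · have := (PySem.List.mem_pyRange_one).1 hi
      omega
theorem sum_ind_mem (b : String) (P : Bool) (xs : List String) (hnd : xs.Nodup) :
    (xs.map (fun y => if y = b ∧ P = true then (1:Int) else 0)).sum
      = if b ∈ xs ∧ P = true then 1 else 0 := by
  induction xs with
  | nil => simp
  | cons x t ih =>
    rw [List.nodup_cons] at hnd
    simp only [List.map_cons, List.sum_cons, ih hnd.2, List.mem_cons]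
    by_cases hxb : x = b
    · subst hxb
      have : x ∉ t := hnd.1
      split_ifs <;> simp_all
    · split_ifs <;> simp_all
theorem pairSum_single (a b : String) (hab : a ≠ b) (geq : String → String → Bool)
    (hsym : ∀ x y, geq x y = geq y x) (ks : List String) (hnd : ks.Nodup) :
    pairSum (fun x y => if ((x = a ∧ y = b) ∨ (x = b ∧ y = a)) ∧ geq x y = true then 1 else 0) ks
    = if a ∈ ks ∧ b ∈ ks ∧ geq a b = true then 1 else 0 := by
  induction ks with
  | nil => simp [pairSum]
  | cons x xs ih =>
    rw [List.nodup_cons] at hnd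
    rw [pairSum, ih hnd.2]
    by_cases hxa : x = a
    · subst hxa
      have hx : x ∉ xs := hnd.1
      have h1 : (xs.map (fun y => if ((x = x ∧ y = b) ∨ (x = b ∧ y = x)) ∧ geq x y = true then (1:Int) else 0)).sum
          = (xs.map (fun y => if y = b ∧ geq x b = true then (1:Int) else 0)).sum := by
        apply congrArg
        apply List.map_congr_left
        intro y _
        by_cases hyb : y = b <;> simp [hyb, hab, hab.symm]
      rw [h1, sum_ind_mem b (geq x b) xs hnd.2]
      simp [List.mem_cons, hx]
      split_ifs <;> simp_all
    · by_cases hxb : x = b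
      · subst hxb
        have hx : x ∉ xs := hnd.1
        have h1 : (xs.map (fun y => if ((x = a ∧ y = x) ∨ (x = x ∧ y = a)) ∧ geq x y = true then (1:Int) else 0)).sum
            = (xs.map (fun y => if y = a ∧ geq a x = true then (1:Int) else 0)).sum := by
          apply congrArg
          apply List.map_congr_left
          intro y _
          rw [hsym a x]
          by_cases hya : y = a <;> simp [hya, hxa]
        rw [h1, sum_ind_mem a (geq a x) xs hnd.2]
        simp [List.mem_cons, hx]
        split_ifs <;> simp_all
      · have h1 : (xs.map (fun y => if ((x = a ∧ y = b) ∨ (x = b ∧ y = a)) ∧ geq x y = true then (1:Int) else 0)).sum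
            = 0 := by
          simp [hxa, hxb]
        rw [h1]
        simp only [List.mem_cons, zero_add]
        split_ifs <;> simp_all <;> tauto
theorem cap_eq (d : PySem.Dict String String) :
    ((d.values.foldl (fun c s => c.insert s (c.getD s 0 + 1)) PySem.Dict.empty).items.foldl
      (fun v p => if p.2 > MAX_CAP then v + (p.2 - MAX_CAP) else v) (0 : Int))
    = ((d.items.foldl (fun g p => g.modify p.2 [] (fun ms => ms ++ [p.1]))
        PySem.Dict.empty).values.map (fun ms => max 0 ((ms.length : Int) - MAX_CAP))).sum := by
  rw [PySem.Dict.foldl_insert_getD_add_one_eq_counter]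
  rw [PySem.List.foldl_congr_mem (g := fun v p => v + max 0 (p.2 - MAX_CAP))
      (h := by intro v p _; simp only [MAX_CAP]; split_ifs <;> omega)]
  rw [PySem.List.foldl_add, PySem.Dict.items_counter, List.map_map]
  -- B side
  have hswap : d.items.foldl (fun g p => g.modify p.2 [] (fun ms => ms ++ [p.1])) PySem.Dict.empty
      = (d.items.map (fun p => (p.2, p.1))).foldl
          (fun g p => g.modify p.1 [] (fun ms => ms ++ [p.2])) PySem.Dict.empty := by
    rw [List.foldl_map]
  rw [hswap]
  rw [PySem.Dict.values_eq_map_keys _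
      (PySem.Dict.nodup_keys_foldl_modify_key _ _ _ _ _ PySem.Dict.nodup_keys_empty) []]
  rw [PySem.Dict.keys_foldl_modify_key (key := Prod.fst)]
  rw [List.map_map, List.map_map, zero_add]
  have hkeys : PySem.Set.update (PySem.Dict.empty : PySem.Dict String (List String)).keys
        (List.map (Prod.fst ∘ fun p => (p.2, p.1)) d.items)
      = PySem.Set.ofList d.values := by
    simp [PySem.Set.update, PySem.Set.ofList_eq_foldl, PySem.Dict.values, Function.comp_def,
      PySem.Dict.keys, PySem.Dict.empty]
  rw [hkeys]
  apply congrArg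
  apply List.map_congr_left
  intro k _
  simp only [Function.comp_def]
  rw [PySem.Dict.getD_foldl_modify_append]
  have hlen : ((((d.items.map (fun p => (p.2, p.1))).filter (fun p => p.1 == k)).map (·.2))).length
      = d.values.count k := by
    rw [List.length_map, ← List.countP_eq_length_filter, List.countP_map]
    simp [PySem.Dict.values, List.count, List.countP_map, Function.comp_def]
  have he : (PySem.Dict.empty : PySem.Dict String (List String)).getD k [] = [] := rfl
  rw [he, List.nil_append, hlen]
set_option maxHeartbeats 1000000 in
theorem anti_pointwise (geq : String → String → Bool) (x y : String) :
    (if (ANTI_AFFINITY_PAIRS.contains (x, y) || ANTI_AFFINITY_PAIRS.contains (y, x)) && geq x y then (1:Int) else 0)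
    = (if ((x = "M1" ∧ y = "M2") ∨ (x = "M2" ∧ y = "M1")) ∧ geq x y = true then 1 else 0)
    + (if ((x = "M3" ∧ y = "M4") ∨ (x = "M4" ∧ y = "M3")) ∧ geq x y = true then 1 else 0)
    + (if ((x = "M5" ∧ y = "M6") ∨ (x = "M6" ∧ y = "M5")) ∧ geq x y = true then 1 else 0)
    + (if ((x = "M1" ∧ y = "M5") ∨ (x = "M5" ∧ y = "M1")) ∧ geq x y = true then 1 else 0) := by
  have h : ANTI_AFFINITY_PAIRS = [("M1", "M2"), ("M3", "M4"), ("M5", "M6"), ("M1", "M5")] := by decide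
  rw [h]
  simp only [PySem.Set.contains, List.contains_cons, List.elem_nil, Bool.or_false,
    Prod.mk.injEq, beq_iff_eq, Bool.and_eq_true, Bool.or_eq_true]
  split_ifs <;> simp_all <;> aesop
theorem pairSum_congr (c c' : String → String → Int) (h : ∀ x y, c x y = c' x y)
    (ks : List String) : pairSum c ks = pairSum c' ks := by
  induction ks with
  | nil => rfl
  | cons x xs ih =>
    rw [pairSum, pairSum, ih]
    congr 1
    exact congrArg _ (List.map_congr_left (fun y _ => h x y))

theorem pairSum_add (c c' : String → String → Int) (ks : List String) :
    pairSum (fun x y => c x y + c' x y) ks = pairSum c ks + pairSum c' ks := by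
  induction ks with
  | nil => rfl
  | cons x xs ih =>
    rw [pairSum, pairSum, pairSum, ih, List.sum_map_add]
    ring

theorem anti_eq (d : PySem.Dict String String) (hnd : d.keys.Nodup) :
    pairSum (fun x y => if (ANTI_AFFINITY_PAIRS.contains (x, y) || ANTI_AFFINITY_PAIRS.contains (y, x))
        && (d.get? x == d.get? y) then (1:Int) else 0) d.keys
    = (ANTI_AFFINITY_PAIRS.map (fun p => if d.contains p.1 && d.contains p.2
        && (d.get? p.1 == d.get? p.2) then (1:Int) else 0)).sum := by
  have hsym : ∀ x y : String, (d.get? x == d.get? y) = (d.get? y == d.get? x) := by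
    intro x y
    by_cases h : d.get? x = d.get? y
    · simp [h]
    · simp [beq_eq_false_iff_ne.2 h, beq_eq_false_iff_ne.2 (Ne.symm h)]
  rw [pairSum_congr _ _ (fun x y => anti_pointwise (fun x y => d.get? x == d.get? y) x y)]
  rw [pairSum_add, pairSum_add, pairSum_add]
  rw [pairSum_single "M1" "M2" (by decide) _ hsym _ hnd,
      pairSum_single "M3" "M4" (by decide) _ hsym _ hnd,
      pairSum_single "M5" "M6" (by decide) _ hsym _ hnd,
      pairSum_single "M1" "M5" (by decide) _ hsym _ hnd]
  have h : ANTI_AFFINITY_PAIRS = [("M1", "M2"), ("M3", "M4"), ("M5", "M6"), ("M1", "M5")] := by decide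
  rw [h]
  simp only [List.map_cons, List.map_nil, List.sum_cons, List.sum_nil, add_zero,
    Bool.and_eq_true, PySem.Dict.contains_iff_mem_keys, and_assoc]
  ring

theorem ports_eq (assignment : List (String × String)) :
    count_violations assignment = count_violations_alt assignment := by
  unfold count_violations count_violations_alt
  dsimp only
  set d := PySem.Dict.ofList assignment with hd
  have hnd : d.keys.Nodup := by rw [hd]; exact PySem.Dict.nodup_keys_ofList _
  have hb : (fun (acc : Int) i =>
      List.foldl
        (fun acc j =>
          if ANTI_AFFINITY_PAIRS.contains
              (if ANTI_AFFINITY_PAIRS.contains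
                    (PySem.List.pyGetD d.keys i "", PySem.List.pyGetD d.keys j "") = true then
                  (PySem.List.pyGetD d.keys i "", PySem.List.pyGetD d.keys j "")
                else
                  (PySem.List.pyGetD d.keys j "", PySem.List.pyGetD d.keys i "")) = true then
            if (d.get? (PySem.List.pyGetD d.keys i "") == d.get? (PySem.List.pyGetD d.keys j "")) = true then
              acc + 1
            else acc
          else acc)
        acc (PySem.List.pyRange (i + 1) (PySem.List.len d.keys) 1))
      = fun (acc : Int) i =>
        List.foldl (fun a j => a +
          (fun x y => if (ANTI_AFFINITY_PAIRS.contains (x, y) || ANTI_AFFINITY_PAIRS.contains (y, x))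
              && (d.get? x == d.get? y) then (1:Int) else 0)
            (PySem.List.pyGetD d.keys i "") (PySem.List.pyGetD d.keys j ""))
          acc (PySem.List.pyRange (i + 1) (PySem.List.len d.keys) 1) := by
    funext acc i
    congr 1
    funext a j
    by_cases h1 : (PySem.List.pyGetD d.keys i "", PySem.List.pyGetD d.keys j "") ∈ ANTI_AFFINITY_PAIRS <;>
      by_cases h2 : (PySem.List.pyGetD d.keys j "", PySem.List.pyGetD d.keys i "") ∈ ANTI_AFFINITY_PAIRS <;>
      by_cases h3 : (d.get? (PySem.List.pyGetD d.keys i "") == d.get? (PySem.List.pyGetD d.keys j "")) = true <;>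
      simp [h1, h2, h3]
  rw [hb]
  rw [double_loop d.keys (fun x y =>
    if (ANTI_AFFINITY_PAIRS.contains (x, y) || ANTI_AFFINITY_PAIRS.contains (y, x))
        && (d.get? x == d.get? y) then (1:Int) else 0)]
  rw [cap_eq d, anti_eq d hnd]

-- ===== VERDICT (by name: the statement is the Claim_ definition above) =====
theorem count_violations_spec : Claim_equal_count_violations := by
  intro assignment _
  unfold Spec_count_violations
  exact ports_eq assignment
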